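-- pv_equiv track=rewrite | github.com/liupengsay/PyIsTheBestLang | src/struct/monotonic_stack/problem.py | lc_2355
-- ===== SOURCE A (Python) =====
-- from typing import List
--
-- def lc_2355(books: List[int]) -> int:
--     """
--     url: https://leetcode.cn/problems/maximum-number-of-books-you-can-take/
--     tag: monotonic_stack|liner_dp
--     """
--     n = len(books)
--     dp = [0] * n
--     stack = []
--     for i in range(n):
--
--         while stack and stack[-1][0] >= books[i] - i:
--             stack.pop()
--
--         end = books[i]
--         size = i + 1 if not stack else i - stack[-1][1]
--         size = size if size < end else end
--         cur = (end + end - size + 1) * size // 2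
--
--         dp[i] = dp[stack[-1][1]] + cur if stack else cur
--         stack.append([books[i] - i, i])
--     return max(dp)
-- ===== SOURCE B (Python) =====
-- from typing import List
--
-- def lc_2355(books: List[int]) -> int:
--     # For each index i, find the nearest j < i with books[j]-j < books[i]-i by a direct
--     # leftward scan (no stack), then reuse the memoized optimum g[j].
--     n = len(books)
--     g = []
--     for i in range(n):
--         kv = books[i] - i
--         j = i - 1
--         while j >= 0 and books[j] - j >= kv:
--             j -= 1
--         width = i + 1 if j < 0 else i - j
--         size = min(width, books[i])
--         cur = (2 * books[i] - size + 1) * size // 2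
--         g.append(cur if j < 0 else cur + g[j])
--     return max(g)
-- ===== Notes on version B (the rewrite author's own statement) =====
-- stated objective: alternative
-- what changed: Replaces the monotonic stack by a direct leftward scan per index for the previous strictly-smaller key (books[j]-j), memoizing per-index optima in a growing list; identical values, no stack bookkeeping.
-- outside the precondition, e.g. on lc_2355([]): A raises ValueError, B raises ValueError
import Mathlib
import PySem

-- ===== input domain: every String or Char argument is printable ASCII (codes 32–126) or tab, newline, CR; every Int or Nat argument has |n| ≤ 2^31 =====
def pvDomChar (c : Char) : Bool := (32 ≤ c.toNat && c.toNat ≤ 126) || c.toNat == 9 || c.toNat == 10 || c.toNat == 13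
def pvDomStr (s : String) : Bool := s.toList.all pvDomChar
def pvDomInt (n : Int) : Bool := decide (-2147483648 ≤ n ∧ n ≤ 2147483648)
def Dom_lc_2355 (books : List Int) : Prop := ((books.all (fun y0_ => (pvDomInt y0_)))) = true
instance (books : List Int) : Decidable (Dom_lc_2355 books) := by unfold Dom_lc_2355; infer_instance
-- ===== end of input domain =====

-- B replaces A's monotonic stack by a direct leftward scan per index (memoized per-index optima); same return value, no stack bookkeeping.


-- ===== PORT A =====
-- 'while stack and stack[-1][0] >= kv: stack.pop()'  (stack top is the list head here)
def lc2355popWhile (kv : Int) : List (Int × Int) → List (Int × Int)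
  | [] => []
  | (k, j) :: rest => if k ≥ kv then lc2355popWhile kv rest else (k, j) :: rest

def lc_2355 (books : List Int) : Int :=
  let n := books.length
  let fin := (PySem.List.pyRange 0 (n : Int) 1).foldl
    (fun st i =>
      let dp := st.1
      let bi := PySem.List.pyGetD books i 0
      let stack := lc2355popWhile (bi - i) st.2
      let size0 := match stack with | [] => i + 1 | (_, j) :: _ => i - j
      let size := if size0 < bi then size0 else bi
      let cur := PySem.Int.floordiv ((bi + bi - size + 1) * size) 2
      let dpi := match stack with | [] => cur | (_, j) :: _ => PySem.List.pyGetD dp j 0 + cur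
      (dp.set i.toNat dpi, (bi - i, i) :: stack))
    (List.replicate n 0, ([] : List (Int × Int)))
  (PySem.List.max? fin.1 (fun x => x)).getD 0   -- max(dp); Pre_ excludes [], where Python raises

-- ===== PORT B =====
-- 'j = i-1; while j >= 0 and books[j]-j >= kv: j -= 1'
def lc2355scanJ (books : List Int) (kv : Int) (j : Int) : Int :=
  if h : j < 0 then j
  else if PySem.List.pyGetD books j 0 - j ≥ kv then lc2355scanJ books kv (j - 1)
  else j
  termination_by (j + 1).toNat
  decreasing_by simp at h; omega

def lc_2355_alt (books : List Int) : Int :=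
  let n := books.length
  let g := (PySem.List.pyRange 0 (n : Int) 1).foldl
    (fun g i =>
      let bi := PySem.List.pyGetD books i 0
      let j := lc2355scanJ books (bi - i) (i - 1)
      let width := if j < 0 then i + 1 else i - j
      let size := min width bi
      let cur := PySem.Int.floordiv ((2 * bi - size + 1) * size) 2
      g ++ [if j < 0 then cur else cur + PySem.List.pyGetD g j 0])
    ([] : List Int)
  (PySem.List.max? g (fun x => x)).getD 0   -- max(g); Pre_ excludes [], where Python raises

-- ===== PRECONDITION & SPEC =====
-- Python's max([]) raises ValueError on the empty list (both A and B raise there).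
def Pre_lc_2355 (books : List Int) : Prop := books ≠ []
instance (books : List Int) : Decidable (Pre_lc_2355 books) := by unfold Pre_lc_2355; infer_instance
def pvWitness_lc_2355 : List Int := ([4, 2, 3])

def Spec_lc_2355 (books : List Int) (out : Int) : Prop := out = lc_2355_alt books
instance (books : List Int) (out : Int) : Decidable (Spec_lc_2355 books out) := by unfold Spec_lc_2355; infer_instance

-- ===== CLAIM (what is proved, stated in full; the proofs are below) =====
def Claim_equal_lc_2355 : Prop := ∀ (books : List Int), Dom_lc_2355 books → Pre_lc_2355 books → Spec_lc_2355 books (lc_2355 books)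

-- ===== LEMMAS AND PROOFS =====

-- key of index j: books[j] - j
def pvK (b : List Int) (j : Nat) : Int := b.getD j 0 - (j : Int)

-- greatest index j' ≤ t with pvK b j' < kv
def pvScan (b : List Int) (kv : Int) : Nat → Option Nat
  | 0 => if pvK b 0 < kv then some 0 else none
  | (t+1) => if pvK b (t+1) < kv then some (t+1) else pvScan b kv t

-- previous index with strictly smaller key
def pvPss (b : List Int) : Nat → Option Nat
  | 0 => none
  | (t+1) => pvScan b (pvK b (t+1)) t

lemma pvScan_le (b : List Int) (kv : Int) : ∀ t j, pvScan b kv t = some j → j ≤ t := by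
  intro t
  induction t with
  | zero =>
    intro j h
    unfold pvScan at h
    by_cases hk : pvK b 0 < kv <;> simp [hk] at h
    omega
  | succ t ih =>
    intro j h
    unfold pvScan at h
    by_cases hk : pvK b (t+1) < kv <;> simp [hk] at h
    · omega
    · have := ih _ h; omega

lemma pvPss_lt (b : List Int) : ∀ i j, pvPss b i = some j → j < i := by
  intro i j h
  cases i with
  | zero => simp [pvPss] at h
  | succ t =>
    unfold pvPss at h
    have := pvScan_le b _ t j h
    omega

-- common per-index optimum
def pvG (b : List Int) (i : Nat) : Int :=
  match h : pvPss b i with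
  | none =>
      let e := b.getD i 0
      let s := if (i : Int) + 1 < e then (i : Int) + 1 else e
      PySem.Int.floordiv ((e + e - s + 1) * s) 2
  | some j =>
      let e := b.getD i 0
      let s := if (i : Int) - (j : Int) < e then (i : Int) - (j : Int) else e
      pvG b j + PySem.Int.floordiv ((e + e - s + 1) * s) 2
  termination_by i
  decreasing_by exact pvPss_lt b i _ h

-- A's stack after processing index j, as a chain of previous-smaller links
def pvChain (b : List Int) : Option Nat → List (Int × Int)
  | none => []
  | some j => (pvK b j, (j : Int)) :: pvChain b (pvPss b j)
  termination_by o => match o with | none => 0 | some j => j + 1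
  decreasing_by
    cases h : pvPss b j with
    | none => simp
    | some j' => have := pvPss_lt b j _ h; simp; omega

lemma pvScan_trans (b : List Int) (kv kv' : Int) (hle : kv ≤ kv') :
    ∀ t, pvScan b kv t =
      (match pvScan b kv' t with | none => none | some j' => pvScan b kv j') := by
  intro t
  induction t with
  | zero =>
    by_cases h0 : pvK b 0 < kv'
    · simp [pvScan, h0]
    · have h0' : ¬ pvK b 0 < kv := by omega
      simp [pvScan, h0, h0']
  | succ t ih =>
    by_cases hk' : pvK b (t+1) < kv'
    · simp [pvScan, hk']
    · have hk : ¬ pvK b (t+1) < kv := by omega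
      simp only [pvScan, hk', hk]
      exact ih

lemma pop_chain (b : List Int) (kv : Int) :
    ∀ j : Nat, lc2355popWhile kv (pvChain b (some j)) = pvChain b (pvScan b kv j) := by
  intro j
  induction j using Nat.strong_induction_on with
  | _ j ih =>
    rw [pvChain]
    by_cases hk : pvK b j ≥ kv
    · rw [lc2355popWhile, if_pos hk]
      cases j with
      | zero =>
        have h0 : ¬ pvK b 0 < kv := by omega
        simp [pvPss, pvChain, pvScan, h0, lc2355popWhile]
      | succ t =>
        have hlt : ¬ pvK b (t+1) < kv := by omega
        rw [show pvScan b kv (t+1) = pvScan b kv t by simp [pvScan, hlt]]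
        rw [pvScan_trans b kv (pvK b (t+1)) (by omega) t]
        rw [show pvPss b (t+1) = pvScan b (pvK b (t+1)) t from rfl]
        cases hc : pvScan b (pvK b (t+1)) t with
        | none => simp [pvChain, lc2355popWhile]
        | some j' =>
          have hj' : j' ≤ t := pvScan_le b _ t j' hc
          exact ih j' (by omega)
    · rw [lc2355popWhile, if_neg hk]
      cases j with
      | zero =>
        have h0 : pvK b 0 < kv := by omega
        simp [pvScan, h0, pvChain]
      | succ t =>
        have hlt : pvK b (t+1) < kv := by omega
        simp [pvScan, hlt, pvChain]

lemma scanJ_encode (b : List Int) (kv : Int) :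
    ∀ t : Nat, lc2355scanJ b kv (t : Int) =
      (match pvScan b kv t with | none => -1 | some j => (j : Int)) := by
  intro t
  induction t with
  | zero =>
    rw [lc2355scanJ]
    rw [dif_neg (show ¬ (((0:Nat):Int) < 0) by omega)]
    rw [show PySem.List.pyGetD b ((0:Nat):Int) 0 = b.getD 0 0 from PySem.List.pyGetD_natCast b 0 0]
    by_cases hk : pvK b 0 < kv
    · rw [if_neg (show ¬ (b.getD 0 0 - ((0:Nat):Int) ≥ kv) by unfold pvK at hk; omega)]
      simp [pvScan, hk]
    · rw [if_pos (show b.getD 0 0 - ((0:Nat):Int) ≥ kv by unfold pvK at hk; omega)]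
      rw [lc2355scanJ]
      rw [dif_pos (show ((0:Nat):Int) - 1 < 0 by omega)]
      simp [pvScan, hk]
  | succ t ih =>
    rw [lc2355scanJ]
    rw [dif_neg (show ¬ ((((t+1:Nat)):Int) < 0) by omega)]
    rw [show PySem.List.pyGetD b (((t+1:Nat)):Int) 0 = b.getD (t+1) 0 from
      PySem.List.pyGetD_natCast b (t+1) 0]
    by_cases hk : pvK b (t+1) < kv
    · rw [if_neg (show ¬ (b.getD (t+1) 0 - (((t+1:Nat)):Int) ≥ kv) by unfold pvK at hk; omega)]
      simp [pvScan, hk]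
    · rw [if_pos (show b.getD (t+1) 0 - (((t+1:Nat)):Int) ≥ kv by unfold pvK at hk; omega)]
      rw [show (((t+1:Nat)):Int) - 1 = (t : Int) by omega]
      rw [ih]
      simp [pvScan, hk]

-- proof-only helpers: the two loop bodies as named functions, and the loop invariants
def pvStepA (b : List Int) (st : List Int × List (Int × Int)) (i : Int) : List Int × List (Int × Int) :=
  let dp := st.1
  let bi := PySem.List.pyGetD b i 0
  let stack := lc2355popWhile (bi - i) st.2
  let size0 := match stack with | [] => i + 1 | (_, j) :: _ => i - j
  let size := if size0 < bi then size0 else bi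
  let cur := PySem.Int.floordiv ((bi + bi - size + 1) * size) 2
  let dpi := match stack with | [] => cur | (_, j) :: _ => PySem.List.pyGetD dp j 0 + cur
  (dp.set i.toNat dpi, (bi - i, i) :: stack)

def pvStepB (b : List Int) (g : List Int) (i : Int) : List Int :=
  let bi := PySem.List.pyGetD b i 0
  let j := lc2355scanJ b (bi - i) (i - 1)
  let width := if j < 0 then i + 1 else i - j
  let size := min width bi
  let cur := PySem.Int.floordiv ((2 * bi - size + 1) * size) 2
  g ++ [if j < 0 then cur else cur + PySem.List.pyGetD g j 0]

def pvPrev : Nat → Option Nat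
  | 0 => none
  | (t+1) => some t

def pvDpA (b : List Int) (i : Nat) : List Int :=
  (List.range b.length).map (fun m => if m < i then pvG b m else 0)

lemma lcA_eq (b : List Int) :
    lc_2355 b = (PySem.List.max?
      (((PySem.List.pyRange 0 (b.length : Int) 1).foldl (pvStepA b)
        (List.replicate b.length 0, ([] : List (Int × Int)))).1) (fun x => x)).getD 0 := rfl

lemma lcB_eq (b : List Int) :
    lc_2355_alt b = (PySem.List.max?
      ((PySem.List.pyRange 0 (b.length : Int) 1).foldl (pvStepB b) ([] : List Int))
      (fun x => x)).getD 0 := rfl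

lemma pyGetD_map_pvG (b : List Int) (i j : Nat) (hj : j < i) :
    PySem.List.pyGetD ((List.range i).map (pvG b)) (j : Int) 0 = pvG b j := by
  rw [PySem.List.pyGetD_natCast]
  simp [List.getD_eq_getElem?_getD, hj]

lemma pyGetD_dpA (b : List Int) (i j : Nat) (hj : j < i) (hjn : j < b.length) :
    PySem.List.pyGetD (pvDpA b i) (j : Int) 0 = pvG b j := by
  rw [PySem.List.pyGetD_natCast]
  simp [pvDpA, List.getD_eq_getElem?_getD, hj, hjn]

lemma pop_prev (b : List Int) (i : Nat) :
    lc2355popWhile (b.getD i 0 - (i : Int)) (pvChain b (pvPrev i)) = pvChain b (pvPss b i) := by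
  cases i with
  | zero => simp [pvPrev, pvChain, lc2355popWhile, pvPss]
  | succ t =>
    rw [show pvPrev (t+1) = some t from rfl]
    rw [show b.getD (t+1) 0 - ((t+1 : Nat) : Int) = pvK b (t+1) from rfl]
    rw [pop_chain b (pvK b (t+1)) t]
    rfl

lemma ite_lt_min (a b : Int) : (if a < b then a else b) = min a b := by
  split <;> omega

lemma dpA_set (b : List Int) (i : Nat) :
    (pvDpA b i).set i (pvG b i) = pvDpA b (i+1) := by
  apply List.ext_getElem
  · simp [pvDpA]
  · intro m hm hm'
    simp only [pvDpA, List.length_map, List.length_range] at hm' ⊢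
    rw [List.getElem_set]
    simp only [List.getElem_map, List.getElem_range]
    by_cases hmi : i = m
    · subst hmi; simp
    · simp only [hmi, if_false]
      by_cases h1 : m < i
      · simp [h1, show m < i + 1 by omega]
      · simp [h1, show ¬ m < i + 1 by omega]

lemma pvG_eq_none (b : List Int) (i : Nat) (hp : pvPss b i = none) :
    pvG b i =
      PySem.Int.floordiv
        ((b.getD i 0 + b.getD i 0 - (if (i : Int) + 1 < b.getD i 0 then (i : Int) + 1 else b.getD i 0) + 1)
          * (if (i : Int) + 1 < b.getD i 0 then (i : Int) + 1 else b.getD i 0)) 2 := by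
  unfold pvG
  split
  · rfl
  · rename_i j h; rw [hp] at h; exact absurd h (by simp)

lemma pvG_eq_some (b : List Int) (i j : Nat) (hp : pvPss b i = some j) :
    pvG b i = pvG b j +
      PySem.Int.floordiv
        ((b.getD i 0 + b.getD i 0 - (if (i : Int) - (j : Int) < b.getD i 0 then (i : Int) - (j : Int) else b.getD i 0) + 1)
          * (if (i : Int) - (j : Int) < b.getD i 0 then (i : Int) - (j : Int) else b.getD i 0)) 2 := by
  conv_lhs => unfold pvG
  split
  · rename_i h; rw [hp] at h; exact absurd h (by simp)
  · rename_i j' h; rw [hp] at h; injection h with h; subst h; rfl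

lemma stepA_eq (b : List Int) (i : Nat) (hi : i < b.length) :
    pvStepA b (pvDpA b i, pvChain b (pvPrev i)) (i : Int) = (pvDpA b (i+1), pvChain b (some i)) := by
  unfold pvStepA
  simp only [PySem.List.pyGetD_natCast]
  rw [show lc2355popWhile (b.getD i 0 - (i : Int)) (pvChain b (pvPrev i))
        = pvChain b (pvPss b i) from pop_prev b i]
  cases hp : pvPss b i with
  | none =>
    rw [show pvChain b none = [] by rw [pvChain]]
    rw [Prod.mk.injEq]
    refine ⟨?_, ?_⟩
    · rw [Int.toNat_natCast, ← dpA_set b i, pvG_eq_none b i hp]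
    · rw [show pvChain b (some i) = (pvK b i, (i : Int)) :: pvChain b (pvPss b i) by rw [pvChain]]
      rw [hp, show pvChain b none = [] by rw [pvChain]]
      rfl
  | some j =>
    have hji : j < i := pvPss_lt b i j hp
    rw [show pvChain b (some j) = (pvK b j, (j : Int)) :: pvChain b (pvPss b j) by rw [pvChain]]
    dsimp only
    rw [Prod.mk.injEq]
    refine ⟨?_, ?_⟩
    · rw [Int.toNat_natCast, ← dpA_set b i]
      congr 1
      rw [pyGetD_dpA b i j hji (by omega), pvG_eq_some b i j hp]
    · rw [show pvChain b (some i) = (pvK b i, (i : Int)) :: pvChain b (pvPss b i) by rw [pvChain]]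
      rw [hp, show pvChain b (some j) = (pvK b j, (j : Int)) :: pvChain b (pvPss b j) by rw [pvChain]]
      rfl

lemma foldA (b : List Int) : ∀ i, i ≤ b.length →
    (List.range i).foldl (fun st (k : Nat) => pvStepA b st (k : Int))
      (List.replicate b.length 0, ([] : List (Int × Int)))
      = (pvDpA b i, pvChain b (pvPrev i)) := by
  intro i
  induction i with
  | zero =>
    intro _
    rw [List.range_zero, List.foldl_nil, show pvChain b (pvPrev 0) = [] by rw [pvPrev, pvChain]]
    rw [Prod.mk.injEq]
    refine ⟨?_, rfl⟩
    apply List.ext_getElem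
    · simp [pvDpA]
    · intro m hm hm'
      simp [pvDpA]
  | succ i ih =>
    intro h
    rw [List.range_succ, List.foldl_append, ih (by omega), List.foldl_cons, List.foldl_nil]
    rw [stepA_eq b i (by omega)]
    rfl

lemma stepB_eq (b : List Int) (i : Nat) (hi : i < b.length) :
    pvStepB b ((List.range i).map (pvG b)) (i : Int) = (List.range (i+1)).map (pvG b) := by
  unfold pvStepB
  simp only [PySem.List.pyGetD_natCast]
  have hscan : lc2355scanJ b (b.getD i 0 - (i : Int)) ((i : Int) - 1) =
      (match pvPss b i with | none => -1 | some j => (j : Int)) := by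
    cases i with
    | zero =>
      rw [lc2355scanJ, dif_pos (show ((0 : Nat) : Int) - 1 < 0 by omega)]
      rfl
    | succ t =>
      rw [show (((t+1 : Nat) : Int)) - 1 = (t : Int) by omega]
      rw [show b.getD (t+1) 0 - ((t+1 : Nat) : Int) = pvK b (t+1) from rfl]
      rw [scanJ_encode b (pvK b (t+1)) t]
      rfl
  rw [hscan, List.range_succ, List.map_append]
  congr 1
  cases hp : pvPss b i with
  | none =>
    simp only [List.map_cons, List.map_nil, if_pos (show (-1 : Int) < 0 by omega)]
    rw [pvG_eq_none b i hp, ← ite_lt_min ((i : Int) + 1) (b.getD i 0)]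
    simp only [List.cons.injEq, and_true]
    congr 1
    ring_nf
  | some j =>
    have hji : j < i := pvPss_lt b i j hp
    simp only [List.map_cons, List.map_nil, if_neg (show ¬ ((j : Nat) : Int) < 0 by omega)]
    rw [pyGetD_map_pvG b i j hji, pvG_eq_some b i j hp, ← ite_lt_min ((i : Int) - (j : Int)) (b.getD i 0)]
    simp only [List.cons.injEq, and_true]
    rw [Int.add_comm]
    congr 1
    ring_nf

lemma foldB (b : List Int) : ∀ i, i ≤ b.length →
    (List.range i).foldl (fun g (k : Nat) => pvStepB b g (k : Int)) ([] : List Int)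
      = (List.range i).map (pvG b) := by
  intro i
  induction i with
  | zero => intro _; rfl
  | succ i ih =>
    intro h
    rw [List.range_succ, List.foldl_append, ih (by omega), List.foldl_cons, List.foldl_nil]
    rw [← List.range_succ]
    exact stepB_eq b i (by omega)

lemma lcA_final (b : List Int) :
    lc_2355 b = (PySem.List.max? ((List.range b.length).map (pvG b)) (fun x => x)).getD 0 := by
  rw [lcA_eq, PySem.List.pyRange_zero_natCast, List.foldl_map, foldA b b.length le_rfl]
  rw [show (pvDpA b b.length, pvChain b (pvPrev b.length)).1 = pvDpA b b.length from rfl]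
  have h : pvDpA b b.length = (List.range b.length).map (pvG b) := by
    unfold pvDpA
    apply List.map_congr_left
    intro m hm
    rw [List.mem_range] at hm
    simp [hm]
  rw [h]

lemma lcB_final (b : List Int) :
    lc_2355_alt b = (PySem.List.max? ((List.range b.length).map (pvG b)) (fun x => x)).getD 0 := by
  rw [lcB_eq, PySem.List.pyRange_zero_natCast, List.foldl_map, foldB b b.length le_rfl]

-- ===== VERDICT (by name: the statement is the Claim_ definition above) =====
theorem lc_2355_spec : Claim_equal_lc_2355 := by
  intro books _ _
  unfold Spec_lc_2355
  rw [lcA_final, lcB_final]
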